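-- pv_equiv track=rewrite | github.com/pypi-data/pypi-mirror-395 | packages/nzmath/nzmath-3.0.3.tar.gz/nzmath-3.0.3/src/nzmath/gcd.py | pairwise_coprime
-- ===== SOURCE A (Python) =====
-- def gcd(a, b):
--     """
--     Return the greatest common divisor of 2 integers a and b.
--     Return 0 if a == b == 0, though 0 cannot be any divisor.
--     """
--     a, b = abs(a), abs(b)
--     while b:
--         a, b = b, a % b
--     return a
--
-- def coprime(a, b):
--     """
--     Return True if a and b are coprime, False otherwise.
--
--     For Example:
--     >>> coprime(8, 5)
--     True
--     >>> coprime(-15, -27)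
--     False
--     >>>
--     """
--     return gcd(a, b) == 1
--
-- def pairwise_coprime(int_list):
--     """
--     Return True if all integers in int_list are pairwise coprime,
--     False otherwise.
--
--     For example:
--     >>> pairwise_coprime([1, 2, 3])
--     True
--     >>> pairwise_coprime([1, 2, 3, 4])
--     False
--     >>>
--     """
--     int_iter = iter(int_list)
--     product = next(int_iter)
--     for n in int_iter:
--         if not coprime(product, n):
--             return False
--         product *= n
--     return True
-- ===== SOURCE B (Python) =====
-- def _gcd(a, b):
--     while b:
--         a, b = b, a % b
--     return abs(a)
--
-- def pairwise_coprime(int_list):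
--     rest = list(int_list)
--     while rest:
--         x = rest[0]
--         rest = rest[1:]
--         for y in rest:
--             if _gcd(x, y) != 1:
--                 return False
--     return True
-- ===== Notes on version B (the rewrite author's own statement) =====
-- stated objective: alternative
-- what changed: B replaces A's single-pass running-product trick (testing each new element against the product of all previous ones) with an explicit all-pairs check over successive tails of the list, using a signed Euclidean gcd that takes the absolute value only at the end.
import Mathlib
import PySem

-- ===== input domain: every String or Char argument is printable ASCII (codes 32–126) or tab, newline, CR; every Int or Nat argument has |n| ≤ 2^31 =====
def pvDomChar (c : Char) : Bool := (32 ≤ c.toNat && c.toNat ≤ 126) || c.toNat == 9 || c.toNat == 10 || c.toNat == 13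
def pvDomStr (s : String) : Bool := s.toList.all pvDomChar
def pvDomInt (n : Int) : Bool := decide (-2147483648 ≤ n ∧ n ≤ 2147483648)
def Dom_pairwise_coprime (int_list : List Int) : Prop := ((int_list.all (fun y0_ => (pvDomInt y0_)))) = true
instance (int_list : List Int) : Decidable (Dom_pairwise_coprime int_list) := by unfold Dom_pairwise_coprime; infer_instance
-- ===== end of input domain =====

-- B checks all pairs over successive tails of the list with a signed Euclidean gcd,
-- replacing A's running-product single-pass trick; return-value equivalence only.

-- ===== PORT A =====
-- A's gcd: abs first, then the while-loop on naturals (Python % = Nat % here).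
def pyGcdLoop (a b : Nat) : Nat :=
  if b = 0 then a else pyGcdLoop b (a % b)
decreasing_by exact Nat.mod_lt _ (Nat.pos_of_ne_zero (by assumption))

def pyGcd (a b : Int) : Int := (pyGcdLoop a.natAbs b.natAbs : Nat)

def pyCoprime (a b : Int) : Bool := pyGcd a b == 1

-- the `for n in int_iter` loop of A, carrying the running product
def loopA (product : Int) (l : List Int) : Bool :=
  match l with
  | [] => true
  | n :: rest => if ¬ pyCoprime product n then false else loopA (product * n) rest

def pairwise_coprime (int_list : List Int) : Bool :=
  match int_list with
  | [] => true   -- unreachable: A raises StopIteration on []; excluded by Pre_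
  | x :: rest => loopA x rest

-- ===== PORT B =====
-- B's gcd: signed while-loop with Python's floor-mod, abs only at the end.
-- termination: |a % b| < |b| for b ≠ 0
theorem pyModNatAbsLt (a b : Int) (hb : b ≠ 0) :
    (PySem.Int.mod a b).natAbs < b.natAbs := by
  rcases lt_or_gt_of_ne hb with h | h
  · have := PySem.Int.mod_neg_bounds a h
    omega
  · have h1 := PySem.Int.mod_nonneg a h
    have h2 := PySem.Int.mod_lt a h
    omega

def altGcd (a b : Int) : Int :=
  if hb : b = 0 then |a| else altGcd b (PySem.Int.mod a b)
termination_by b.natAbs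
decreasing_by exact pyModNatAbsLt a b hb

-- outer while over the shrinking tail; inner `for y in rest` is List.all
def loopB (l : List Int) : Bool :=
  match l with
  | [] => true
  | x :: rest => if rest.all (fun y => altGcd x y == 1) then loopB rest else false

def pairwise_coprime_alt (int_list : List Int) : Bool := loopB int_list

-- ===== PRECONDITION & SPEC =====
-- A raises StopIteration on the empty list (next on an empty iterator).
def Pre_pairwise_coprime (int_list : List Int) : Prop := int_list ≠ []
instance (int_list : List Int) : Decidable (Pre_pairwise_coprime int_list) := by
  unfold Pre_pairwise_coprime; infer_instance

def pvWitness_pairwise_coprime : List Int := ([2, 3, 5] : List Int)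

def Spec_pairwise_coprime (int_list : List Int) (out : Bool) : Prop := out = pairwise_coprime_alt int_list
instance (int_list : List Int) (out : Bool) : Decidable (Spec_pairwise_coprime int_list out) := by unfold Spec_pairwise_coprime; infer_instance

-- ===== CLAIM =====
def Claim_equal_pairwise_coprime : Prop := ∀ (int_list : List Int), Dom_pairwise_coprime int_list → Pre_pairwise_coprime int_list → Spec_pairwise_coprime int_list (pairwise_coprime int_list)

-- ===== LEMMAS AND PROOFS =====

theorem pyGcdLoop_eq_gcd (b : Nat) : ∀ a, pyGcdLoop a b = Nat.gcd b a := by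
  induction b using Nat.strong_induction_on with
  | _ b ih =>
    intro a
    unfold pyGcdLoop
    by_cases hb : b = 0
    · simp [hb]
    · rw [if_neg hb, ih (a % b) (Nat.mod_lt _ (Nat.pos_of_ne_zero hb))]
      exact (Nat.gcd_rec b a).symm

theorem pyGcd_eq (a b : Int) : pyGcd a b = (Int.gcd a b : Nat) := by
  simp [pyGcd, Int.gcd, pyGcdLoop_eq_gcd, Nat.gcd_comm]

theorem gcd_shift (b a q : Int) : Int.gcd b (a - q * b) = Int.gcd b a := by
  apply Nat.dvd_antisymm
  · refine Int.dvd_gcd (Int.gcd_dvd_left _ _) ?_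
    have hd : (↑(Int.gcd b (a - q * b)) : Int) ∣ (a - q * b) + q * b :=
      dvd_add (Int.gcd_dvd_right _ _) (Dvd.dvd.mul_left (Int.gcd_dvd_left _ _) q)
    have he : a - q * b + q * b = a := by ring
    rwa [he] at hd
  · exact Int.dvd_gcd (Int.gcd_dvd_left _ _)
      (dvd_sub (Int.gcd_dvd_right _ _) (Dvd.dvd.mul_left (Int.gcd_dvd_left _ _) q))

theorem altGcd_eq_aux (n : Nat) : ∀ (a b : Int), b.natAbs ≤ n → altGcd a b = (Int.gcd a b : Nat) := by
  induction n with
  | zero =>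
    intro a b h
    have hb : b = 0 := by omega
    subst hb
    unfold altGcd
    rw [dif_pos rfl, Int.gcd_zero_right, Int.natCast_natAbs]
  | succ n ih =>
    intro a b h
    unfold altGcd
    by_cases hb : b = 0
    · subst hb
      rw [dif_pos rfl, Int.gcd_zero_right, Int.natCast_natAbs]
    · rw [dif_neg hb, ih b (PySem.Int.mod a b) (by have := pyModNatAbsLt a b hb; omega)]
      have hm : PySem.Int.mod a b = a - PySem.Int.floordiv a b * b := by
        have := PySem.Int.floordiv_mul_add_mod a b
        omega
      rw [hm, gcd_shift, Int.gcd_comm]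

theorem altGcd_eq (a b : Int) : altGcd a b = (Int.gcd a b : Nat) :=
  altGcd_eq_aux b.natAbs a b (le_refl _)

theorem gcd_prod_eq_one_iff (seen : List Int) (n : Int) :
    Int.gcd seen.prod n = 1 ↔ ∀ s ∈ seen, Int.gcd s n = 1 := by
  induction seen with
  | nil => simp
  | cons s t ih =>
    simp only [List.prod_cons, List.mem_cons]
    constructor
    · intro h
      have h' : Nat.Coprime ((s * t.prod).natAbs) n.natAbs := h
      rw [Int.natAbs_mul, Nat.coprime_mul_iff_left] at h'
      intro x hx
      rcases hx with rfl | hx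
      · exact h'.1
      · exact (ih.mp h'.2) x hx
    · intro h
      have h1 : Nat.Coprime s.natAbs n.natAbs := h s (Or.inl rfl)
      have h2 : Int.gcd t.prod n = 1 := ih.mpr (fun x hx => h x (Or.inr hx))
      show Nat.Coprime ((s * t.prod).natAbs) n.natAbs
      rw [Int.natAbs_mul, Nat.coprime_mul_iff_left]
      exact ⟨h1, h2⟩

theorem loopB_iff (l : List Int) :
    loopB l = true ↔ List.Pairwise (fun a b => Int.gcd a b = 1) l := by
  induction l with
  | nil => simp [loopB]
  | cons x rest ih =>
    simp only [loopB, List.pairwise_cons]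
    by_cases h : (rest.all (fun y => altGcd x y == 1)) = true
    · simp only [h, if_true, ih]
      simp only [List.all_eq_true, beq_iff_eq, altGcd_eq, Nat.cast_eq_one] at h
      constructor
      · exact fun hp => ⟨fun y hy => h y hy, hp⟩
      · exact fun hp => hp.2
    · simp only [Bool.not_eq_true] at h
      simp only [h, Bool.false_eq_true, if_false, false_iff]
      intro hp
      apply absurd _ (by simp [h] : ¬ (rest.all (fun y => altGcd x y == 1)) = true)
      simp only [List.all_eq_true, beq_iff_eq, altGcd_eq, Nat.cast_eq_one]
      exact fun y hy => hp.1 y hy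

theorem loopA_iff (l : List Int) : ∀ seen : List Int,
    loopA seen.prod l = true ↔
      (∀ n ∈ l, ∀ s ∈ seen, Int.gcd s n = 1) ∧ List.Pairwise (fun a b => Int.gcd a b = 1) l := by
  induction l with
  | nil => simp [loopA]
  | cons n rest ih =>
    intro seen
    have hcop : pyCoprime seen.prod n = true ↔ ∀ s ∈ seen, Int.gcd s n = 1 := by
      simp only [pyCoprime, pyGcd_eq, beq_iff_eq, Nat.cast_eq_one]
      exact gcd_prod_eq_one_iff seen n
    rw [loopA]
    by_cases h : pyCoprime seen.prod n = true
    · rw [if_neg (by simp [h]),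
        show seen.prod * n = (seen ++ [n]).prod by rw [List.prod_append, List.prod_singleton],
        ih]
      rw [hcop] at h
      simp only [List.pairwise_cons, List.mem_append, List.mem_singleton, List.mem_cons]
      constructor
      · rintro ⟨ha, hb⟩
        refine ⟨?_, ?_, hb⟩
        · rintro m (rfl | hm) s hs
          · exact h s hs
          · exact ha m hm s (Or.inl hs)
        · intro m hm
          exact ha m hm n (Or.inr (Or.inl rfl))
      · rintro ⟨ha, hn, hb⟩
        refine ⟨?_, hb⟩
        rintro m hm s (hs | rfl | hs0)
        · exact ha m (Or.inr hm) s hs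
        · exact hn m hm
        · simp at hs0
    · rw [if_pos h]
      simp only [Bool.false_eq_true, false_iff]
      rintro ⟨ha, _⟩
      exact h (hcop.mpr (fun s hs => ha n List.mem_cons_self s hs))

-- ===== VERDICT =====
theorem pairwise_coprime_spec : Claim_equal_pairwise_coprime := by
  intro l _ hpre
  unfold Spec_pairwise_coprime
  cases l with
  | nil => exact absurd rfl hpre
  | cons x rest =>
    show loopA x rest = loopB (x :: rest)
    rw [Bool.eq_iff_iff, loopB_iff, List.pairwise_cons]
    have := loopA_iff rest [x]
    rw [List.prod_singleton] at this
    rw [this]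
    constructor
    · rintro ⟨ha, hb⟩; exact ⟨fun y hy => ha y hy x (List.mem_singleton_self x), hb⟩
    · rintro ⟨ha, hb⟩
      refine ⟨?_, hb⟩
      rintro m hm s hs
      rw [List.mem_singleton] at hs
      subst hs
      exact ha m hm
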